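-- pv_equiv track=rewrite | github.com/clmarr/rukaten_asmt | UTILS.py | ws_summary
-- ===== SOURCE A (Python) =====
-- TYPING = {"a": lambda x : x.isalpha() and x.islower(),
--           "A": lambda x : x.isalpha() and x.isupper(),
--           "n": lambda x : x.isnumeric()}
--
-- def is_typed(x):
--     return True in [f(x) for f in TYPING.values()]
--
-- def ws_ctype(x):
--     return x if not is_typed(x) else [k for k,v in TYPING.items() if v(x)][0]
--
-- def word_shape(s):
--     return "".join([ws_ctype(ch) for ch in s])
--
-- def ws_summary(s):
--     ws = word_shape(s)
--     out, wsi = ws[:1], 1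
--     while wsi < len(ws):
--         if ws[wsi] == ws[wsi-1]:
--             out += "*"
--             while ws[wsi] == ws[wsi-1] if wsi < len(ws) else False:
--                 wsi += 1
--         else:
--             out += ws[wsi]
--             wsi += 1
--     return out
-- ===== SOURCE B (Python) =====
-- def _shape(ch):
--     if ch.isalpha():
--         if ch.islower():
--             return "a"
--         if ch.isupper():
--             return "A"
--         return ch
--     if ch.isnumeric():
--         return "n"
--     return ch
--
-- def ws_summary(s):
--     runs = []
--     for c in s:
--         k = _shape(c)
--         if runs and runs[-1][0] == k:
--             runs[-1][1] += 1
--         else: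
--             runs.append([k, 1])
--     return "".join(k + ("*" if n > 1 else "") for k, n in runs)
-- ===== Notes on version B (the rewrite author's own statement) =====
-- stated objective: faster
-- what changed: Replaces A's index-walking scan with a nested skip-while over a separately built shape string by one fused pass that builds an explicit run-length list of (shape symbol, count) pairs and then emits each symbol followed by a star marker exactly when its run count exceeds 1; avoiding the intermediate shape string, repeated indexing and quadratic string concatenation is the constant-factor win.
import Mathlib
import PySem

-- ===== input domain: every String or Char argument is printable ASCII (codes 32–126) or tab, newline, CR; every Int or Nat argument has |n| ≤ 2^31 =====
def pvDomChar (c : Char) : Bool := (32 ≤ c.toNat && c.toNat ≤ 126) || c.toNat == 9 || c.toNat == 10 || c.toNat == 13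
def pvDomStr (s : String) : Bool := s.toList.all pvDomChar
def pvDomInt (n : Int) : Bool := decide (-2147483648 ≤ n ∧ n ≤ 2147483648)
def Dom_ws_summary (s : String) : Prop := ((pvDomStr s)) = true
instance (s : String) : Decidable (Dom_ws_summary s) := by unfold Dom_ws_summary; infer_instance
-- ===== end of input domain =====

-- B replaces A's index-walking nested-while scan by one pass building an explicit
-- run-length list (symbol, count) and then emitting symbol + star for counts > 1 (measured faster in a timing run).

-- ===== PORT A =====
-- TYPING dict: keys with their predicates, in insertion order.
-- x.isnumeric() is ported as PySem.Chars.isdigit: exact on the printable-ASCII domain Dom_ws_summary.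
def pvTyping : List (Char × (Char → Bool)) :=
  [('a', fun x => PySem.Chars.isalpha x && PySem.Chars.islower x),
   ('A', fun x => PySem.Chars.isalpha x && PySem.Chars.isupper x),
   ('n', fun x => PySem.Chars.isdigit x)]

-- True in [f(x) for f in TYPING.values()]
def pvIsTyped (x : Char) : Bool := (pvTyping.map (fun kv => kv.2 x)).contains true

-- [k for k,v in TYPING.items() if v(x)][0]; the guard makes the list nonempty, so [0] never raises
def pvWsCtype (x : Char) : Char :=
  if ¬ pvIsTyped x then x
  else (((pvTyping.filter (fun kv => kv.2 x)).map (fun kv => kv.1)).headD x)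

def pvWordShape (l : List Char) : List Char := l.map pvWsCtype

-- the inner while: 'while ws[wsi]==ws[wsi-1] if wsi < len(ws) else False: wsi += 1'
def pvSkipA (ws : List Char) (j : Nat) : Nat :=
  if j < ws.length then
    if ws.getD j ' ' == ws.getD (j-1) ' ' then pvSkipA ws (j+1) else j
  else j
termination_by ws.length - j

-- needed by loopA's termination
theorem pv_le_skipA (ws : List Char) (j : Nat) : j ≤ pvSkipA ws j := by
  rw [pvSkipA]
  split
  · split
    · have := pv_le_skipA ws (j+1); omega
    · exact Nat.le_refl j
  · exact Nat.le_refl j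
termination_by ws.length - j

-- the outer while loop of ws_summary
def pvLoopA (ws : List Char) (wsi : Nat) (out : List Char) : List Char :=
  if wsi < ws.length then
    if ws.getD wsi ' ' == ws.getD (wsi-1) ' ' then
      pvLoopA ws (pvSkipA ws (wsi+1)) (out ++ ['*'])
    else
      pvLoopA ws (wsi+1) (out ++ [ws.getD wsi ' '])
  else out
termination_by ws.length - wsi
decreasing_by
  · have := pv_le_skipA ws (wsi+1); omega
  · omega

def ws_summary (s : String) : String :=
  let ws := pvWordShape s.toList
  String.mk (pvLoopA ws 1 (ws.take 1))

-- ===== PORT B =====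
def pvShapeB (ch : Char) : Char :=
  if PySem.Chars.isalpha ch then
    if PySem.Chars.islower ch then 'a'
    else if PySem.Chars.isupper ch then 'A'
    else ch
  else if PySem.Chars.isdigit ch then 'n'
  else ch

-- one iteration of B's for-loop: extend the last run or start a new one
def pvRunStep (runs : List (Char × Int)) (c : Char) : List (Char × Int) :=
  match runs.getLast? with
  | some p => if p.1 == c then runs.dropLast ++ [(p.1, p.2 + 1)] else runs ++ [(c, 1)]
  | none => runs ++ [(c, 1)]

def ws_summary_alt (s : String) : String :=
  let runs := s.toList.foldl (fun rs ch => pvRunStep rs (pvShapeB ch)) []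
  String.mk (runs.flatMap (fun p => p.1 :: if p.2 > 1 then ['*'] else []))

-- ===== PRECONDITION & SPEC =====
def Spec_ws_summary (s : String) (out : String) : Prop := out = ws_summary_alt s
instance (s : String) (out : String) : Decidable (Spec_ws_summary s out) := by unfold Spec_ws_summary; infer_instance

-- ===== CLAIM (what is proved, stated in full; the proofs are below) =====
def Claim_equal_ws_summary : Prop := ∀ (s : String), Dom_ws_summary s → Spec_ws_summary s (ws_summary s)

-- ===== LEMMAS AND PROOFS =====

-- the two shape functions agree on every character
theorem pv_shape_agree (c : Char) : pvWsCtype c = pvShapeB c := by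
  cases hl : PySem.Chars.islower c <;> cases hu : PySem.Chars.isupper c <;>
    cases hd : PySem.Chars.isdigit c <;>
      simp [pvWsCtype, pvShapeB, pvIsTyped, pvTyping, PySem.Chars.isalpha, hl, hu, hd]

-- canonical form of the run summary of a list whose previous character is `prev`
def pvCore (prev : Char) : List Char → List Char
  | [] => []
  | c :: rest =>
      if c == prev then '*' :: pvCore c (rest.dropWhile (· == c))
      else c :: pvCore c rest
termination_by l => l.length
decreasing_by
  · have := List.length_dropWhile_le (· == c) rest; simp; omega
  · simp

def pvEmit (rs : List (Char × Int)) : List Char :=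
  rs.flatMap (fun p => p.1 :: if p.2 > 1 then ['*'] else [])

-- B's fold starting from an open run (c, n), expressed recursively
def pvR (c : Char) (n : Int) : List Char → List Char
  | [] => c :: if 1 < n then ['*'] else []
  | x :: xs => if x == c then pvR c (n+1) xs
               else (c :: if 1 < n then ['*'] else []) ++ pvR x 1 xs

theorem pvRunStep_concat (done : List (Char × Int)) (c : Char) (n : Int) (x : Char) :
    pvRunStep (done ++ [(c, n)]) x =
      if c == x then done ++ [(c, n + 1)] else (done ++ [(c, n)]) ++ [(x, 1)] := by
  rw [pvRunStep, List.getLast?_concat, List.dropLast_concat]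

theorem pvEmit_append (a b : List (Char × Int)) : pvEmit (a ++ b) = pvEmit a ++ pvEmit b := by
  simp [pvEmit]

theorem pv_foldl_split (l : List Char) (done : List (Char × Int)) (c : Char) (n : Int) :
    List.foldl pvRunStep (done ++ [(c, n)]) l = done ++ List.foldl pvRunStep [(c, n)] l := by
  induction l generalizing done c n with
  | nil => simp
  | cons x xs ih =>
      rw [List.foldl_cons, List.foldl_cons, pvRunStep_concat,
          show ([(c, n)] : List (Char × Int)) = [] ++ [(c, n)] from rfl, pvRunStep_concat]
      by_cases h : c == x
      · rw [if_pos h, if_pos h]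
        simpa using ih done c (n + 1)
      · rw [if_neg h, if_neg h]
        simp only [List.nil_append]
        rw [ih (done ++ [(c, n)]) x 1, ih [(c, n)] x 1]
        simp

theorem pv_foldl_R (l : List Char) (c : Char) (n : Int) :
    pvEmit (List.foldl pvRunStep [(c, n)] l) = pvR c n l := by
  induction l generalizing c n with
  | nil => simp [pvEmit, pvR]
  | cons x xs ih =>
      rw [List.foldl_cons, pvR,
          show ([(c, n)] : List (Char × Int)) = [] ++ [(c, n)] from rfl, pvRunStep_concat]
      by_cases h : c == x
      · have hx : (x == c) = true := by
          have : c = x := by simpa using h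
          simp [this]
        rw [if_pos h, if_pos hx]
        simpa using ih c (n + 1)
      · have hx : (x == c) = false := by
          have : ¬ c = x := by simpa using h
          simpa using fun e => this e.symm
        rw [if_neg h, if_neg (show ¬ ((x == c) = true) from by simp [hx])]
        simp only [List.nil_append]
        rw [pv_foldl_split xs [(c, n)] x 1, pvEmit_append, ih x 1]
        simp [pvEmit]

theorem pvR_core (l : List Char) (c : Char) (n : Int) (hn : 1 ≤ n) :
    pvR c n l = c :: (if 1 < n then '*' :: pvCore c (l.dropWhile (· == c)) else pvCore c l) := by
  induction l generalizing c n with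
  | nil => by_cases h : 1 < n <;> simp [pvR, pvCore, h]
  | cons x xs ih =>
      by_cases h : x == c
      · have hc : x = c := by simpa using h
        subst hc
        rw [pvR, if_pos (by simp), ih x (n + 1) (by omega), if_pos (by omega),
            List.dropWhile_cons_of_pos (by simp)]
        by_cases h1 : 1 < n
        · rw [if_pos h1]
        · have hn1 : n = 1 := by omega
          subst hn1
          rw [if_neg (by omega),
              show pvCore x (x :: xs) = '*' :: pvCore x (xs.dropWhile (· == x)) from by
                rw [pvCore, if_pos (by simp)]]
      · rw [pvR, if_neg h, ih x 1 (by omega), if_neg (show ¬ ((1:Int) < 1) from by omega)]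
        have hdw : (x :: xs).dropWhile (· == c) = x :: xs := List.dropWhile_cons_of_neg (by simpa using h)
        have hcore : pvCore c (x :: xs) = x :: pvCore x xs := by rw [pvCore, if_neg h]
        by_cases h1 : 1 < n
        · rw [if_pos h1, if_pos h1, hdw, hcore]
          simp
        · rw [if_neg h1, if_neg h1, hcore]
          simp

theorem pv_skipA_spec (ws : List Char) (j : Nat) (hj : 1 ≤ j) :
    ws.drop (pvSkipA ws j) = (ws.drop j).dropWhile (· == ws.getD (j-1) ' ') ∧
    ws.getD (pvSkipA ws j - 1) ' ' = ws.getD (j-1) ' ' := by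
  rw [pvSkipA]
  by_cases h : j < ws.length
  · rw [if_pos h]
    have hdrops : ws.drop j = ws.getD j ' ' :: ws.drop (j+1) := by
      rw [List.getD_eq_getElem ws ' ' h]
      exact List.drop_eq_getElem_cons h
    by_cases he : ws.getD j ' ' == ws.getD (j-1) ' '
    · rw [if_pos he]
      have hv : ws.getD j ' ' = ws.getD (j-1) ' ' := by simpa using he
      have ih := pv_skipA_spec ws (j+1) (by omega)
      have hgd : ws.getD ((j+1)-1) ' ' = ws.getD j ' ' := by norm_num
      constructor
      · rw [ih.1, hgd, hv, hdrops, hv, List.dropWhile_cons_of_pos (by simp)]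
      · rw [ih.2, hgd, hv]
    · rw [if_neg he]
      exact ⟨by rw [hdrops, List.dropWhile_cons_of_neg (by simpa using he)], rfl⟩
  · rw [if_neg h]
    refine ⟨?_, rfl⟩
    rw [List.drop_eq_nil_of_le (by omega)]
    simp
termination_by ws.length - j

theorem pv_loopA_core (n : Nat) (ws : List Char) (wsi : Nat) (out : List Char)
    (hn : ws.length ≤ wsi + n) (h1 : 1 ≤ wsi) :
    pvLoopA ws wsi out = out ++ pvCore (ws.getD (wsi-1) ' ') (ws.drop wsi) := by
  induction n generalizing wsi out with
  | zero =>
      rw [pvLoopA, if_neg (by omega), List.drop_eq_nil_of_le (by omega), pvCore]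
      simp
  | succ n ih =>
      rw [pvLoopA]
      by_cases h : wsi < ws.length
      · rw [if_pos h]
        have hdrops : ws.drop wsi = ws.getD wsi ' ' :: ws.drop (wsi+1) := by
          rw [List.getD_eq_getElem ws ' ' h]
          exact List.drop_eq_getElem_cons h
        by_cases he : ws.getD wsi ' ' == ws.getD (wsi-1) ' '
        · rw [if_pos he]
          have hsk := pv_le_skipA ws (wsi+1)
          rw [ih (pvSkipA ws (wsi+1)) (out ++ ['*']) (by omega) (by omega)]
          have hspec := pv_skipA_spec ws (wsi+1) (by omega)
          have hgd : ws.getD ((wsi+1)-1) ' ' = ws.getD wsi ' ' := by norm_num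
          rw [hspec.1, hspec.2, hgd, hdrops, pvCore, if_pos he]
          simp
        · rw [if_neg he]
          rw [ih (wsi+1) (out ++ [ws.getD wsi ' ']) (by omega) (by omega)]
          have hgd : ws.getD ((wsi+1)-1) ' ' = ws.getD wsi ' ' := by norm_num
          rw [hgd, hdrops, pvCore, if_neg he]
          simp
      · rw [if_neg h, List.drop_eq_nil_of_le (by omega), pvCore]
        simp

-- ===== VERDICT (by name: the statement is the Claim_ definition above) =====
theorem ws_summary_spec : Claim_equal_ws_summary := by
  intro s _
  show ws_summary s = ws_summary_alt s
  simp only [ws_summary, ws_summary_alt]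
  rw [← List.foldl_map,
      show s.toList.map pvShapeB = pvWordShape s.toList from
        (List.map_congr_left (fun c _ => pv_shape_agree c)).symm]
  generalize pvWordShape s.toList = ws
  cases ws with
  | nil => rw [pvLoopA]; simp
  | cons hd tl =>
      have hA := pv_loopA_core (hd :: tl).length (hd :: tl) 1 (List.take 1 (hd :: tl))
        (by simp) (by omega)
      simp at hA
      have hB : pvEmit (List.foldl pvRunStep [] (hd :: tl)) = hd :: pvCore hd tl := by
        rw [show List.foldl pvRunStep [] (hd :: tl) = List.foldl pvRunStep [(hd, 1)] tl from by
              simp [pvRunStep],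
            pv_foldl_R tl hd 1, pvR_core tl hd 1 (by omega)]
        simp
      simp only [List.take_succ_cons, List.take_zero]
      rw [hA, ← hB]
      rfl
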